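-- pv_equiv track=rewrite | github.com/BlueBrain/morph-tool | morph_tool/amira_converter.py | _get_section_data
-- ===== SOURCE A (Python) =====
-- from collections import defaultdict
--
-- def _get_section_data(lines):
--     """Read file and extract data per section into a dict of lists."""
--     _converter = {
--         "@1": "node_points",
--         "@2": "node_label",
--         "@3": "edge",
--         "@4": "n_points",
--         "@5": "label",
--         "@6": "point",
--         "@7": "radius",
--     }
--     sections = defaultdict(list)
--     current_section = ""
--     for line in lines:
--         if line.startswith("@"):
--             current_section = line
--         elif not line:
--             current_section = ""
--         elif current_section:
--             sections[_converter[current_section]].append(line)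
--     return dict(sections)
-- ===== SOURCE B (Python) =====
-- def _get_section_data(lines):
--     """Read file and extract data per section into a dict of lists."""
--     _converter = {
--         "@1": "node_points",
--         "@2": "node_label",
--         "@3": "edge",
--         "@4": "n_points",
--         "@5": "label",
--         "@6": "point",
--         "@7": "radius",
--     }
--     sections = {}
--     for i, line in enumerate(lines):
--         if line.startswith("@"):
--             content = []
--             for nxt in lines[i + 1:]:
--                 if not nxt or nxt.startswith("@"):
--                     break
--                 content.append(nxt)
--             if content:
--                 key = _converter[line]
--                 sections.setdefault(key, []).extend(content)
--     return sections
-- ===== Notes on version B (the rewrite author's own statement) =====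
-- stated objective: alternative
-- what changed: Replaces A's single stateful pass with a current-section register by a per-marker decomposition: for each line starting with '@', take the following lines up to the first blank line or next marker as that marker's content block and merge the block into the dict in one step (lazy converter lookup only when the block is nonempty).
import Mathlib
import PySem

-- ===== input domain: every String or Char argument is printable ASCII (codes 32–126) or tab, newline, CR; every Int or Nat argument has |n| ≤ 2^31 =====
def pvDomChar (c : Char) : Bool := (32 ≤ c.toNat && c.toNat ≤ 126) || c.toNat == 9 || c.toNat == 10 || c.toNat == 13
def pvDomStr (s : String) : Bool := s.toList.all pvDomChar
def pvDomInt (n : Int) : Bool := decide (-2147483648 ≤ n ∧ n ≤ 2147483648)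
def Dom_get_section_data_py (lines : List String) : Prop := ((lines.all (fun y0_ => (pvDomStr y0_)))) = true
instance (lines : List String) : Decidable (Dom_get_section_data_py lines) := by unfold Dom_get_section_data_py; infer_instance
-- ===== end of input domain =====

-- B replaces A's stateful single pass (current-section register) by a per-marker decomposition:
-- each marker line takes the following block up to the first blank line or next marker; same return value.


-- ===== PORT A =====
-- the _converter dict, shared verbatim by both Pythons
def pvConv : PySem.Dict String String :=
  PySem.Dict.ofList [("@1", "node_points"), ("@2", "node_label"), ("@3", "edge"),
    ("@4", "n_points"), ("@5", "label"), ("@6", "point"), ("@7", "radius")]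

-- _converter[m]; Python raises KeyError on a missing key — those inputs are excluded by Pre_ (default "" used there)
def pvKey (m : String) : String := (pvConv.get? m).getD ""

-- literal port of A: fold over lines with state (sections, current_section);
-- sections[key].append(line) on a defaultdict(list) is insert key (getD key [] ++ [line])
def get_section_data_py (lines : List String) : List (String × List String) :=
  (lines.foldl
    (fun (st : PySem.Dict String (List String) × String) line =>
      if PySem.Str.startswith line "@" then (st.1, line)
      else if line = "" then (st.1, "")
      else if st.2 ≠ "" then
        (st.1.insert (pvKey st.2) (st.1.getD (pvKey st.2) [] ++ [line]), st.2)
      else st)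
    (PySem.Dict.empty, "")).1.items

-- ===== PORT B =====
-- inner loop of B: collect the following lines until a blank line or the next marker (break)
def pvContent : List String → List String
  | [] => []
  | l :: rest => if l = "" || PySem.Str.startswith l "@" then [] else l :: pvContent rest

-- literal port of B: for i, line in enumerate(lines): on markers, take the block pvContent of lines[i+1:],
-- and if nonempty merge it under _converter[line] (setdefault(key, []).extend(c) = insert key (getD key [] ++ c))
def get_section_data_py_alt (lines : List String) : List (String × List String) :=
  ((PySem.List.enumerate lines 0).foldl
    (fun (sections : PySem.Dict String (List String)) p =>
      if PySem.Str.startswith p.2 "@" then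
        let c := pvContent (PySem.List.slice lines (some (p.1 + 1)) none)
        if c ≠ [] then
          sections.insert (pvKey p.2) (sections.getD (pvKey p.2) [] ++ c)
        else sections
      else sections)
    PySem.Dict.empty).items

-- ===== PRECONDITION & SPEC =====
-- Pre_ excludes exactly the inputs where both Pythons raise KeyError: a line starting with '@' that is not
-- one of the seven converter keys and is immediately followed by a nonempty non-marker line (i.e. has content).
def Pre_get_section_data_py (lines : List String) : Prop :=
  ∀ i, i < lines.length →
    (i + 1 < lines.length →
     PySem.Str.startswith (lines.getD i "") "@" →
     lines.getD (i + 1) "" ≠ "" →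
     ¬ PySem.Str.startswith (lines.getD (i + 1) "") "@" →
     lines.getD i "" ∈ (["@1", "@2", "@3", "@4", "@5", "@6", "@7"] : List String))

instance (lines : List String) : Decidable (Pre_get_section_data_py lines) := by
  unfold Pre_get_section_data_py; exact Nat.decidableBallLT _ _

def pvWitness_get_section_data_py : List String :=
  ["junk", "@3", "1 2", "3 4", "", "skipped", "@3", "5 6", "@1", "p"]

def Spec_get_section_data_py (lines : List String) (out : List (String × List String)) : Prop := out = get_section_data_py_alt lines
instance (lines : List String) (out : List (String × List String)) : Decidable (Spec_get_section_data_py lines out) := by unfold Spec_get_section_data_py; infer_instance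

-- ===== CLAIM (what is proved, stated in full; the proofs are below) =====
def Claim_equal_get_section_data_py : Prop := ∀ (lines : List String), Dom_get_section_data_py lines → Pre_get_section_data_py lines → Spec_get_section_data_py lines (get_section_data_py lines)

-- ===== LEMMAS AND PROOFS =====

-- the common recursive characterisation: process lines structurally, merging each marker's block at once
def pvGo : List String → PySem.Dict String (List String) → PySem.Dict String (List String)
  | [], d => d
  | l :: rest, d =>
      pvGo rest
        (if PySem.Str.startswith l "@" then
          (if pvContent rest = [] then d
           else d.insert (pvKey l) (d.getD (pvKey l) [] ++ pvContent rest))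
         else d)

-- A's fold step, named for the proofs
def pvStepA (st : PySem.Dict String (List String) × String) (line : String) :
    PySem.Dict String (List String) × String :=
  if PySem.Str.startswith line "@" then (st.1, line)
  else if line = "" then (st.1, "")
  else if st.2 ≠ "" then
    (st.1.insert (pvKey st.2) (st.1.getD (pvKey st.2) [] ++ [line]), st.2)
  else st

theorem pvStepA_def (lines : List String) :
    get_section_data_py lines = (lines.foldl pvStepA (PySem.Dict.empty, "")).1.items := rfl

theorem pv_empty_not_marker : PySem.Str.startswith "" "@" = false := by decide

-- A's fold from the two reachable kinds of state equals pvGo (mutual strong induction on length)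
theorem pvA_char (n : Nat) : ∀ (rest : List String), rest.length ≤ n →
    ∀ (d : PySem.Dict String (List String)),
      ((List.foldl pvStepA (d, "") rest).1 = pvGo rest d) ∧
      (∀ m, PySem.Str.startswith m "@" = true →
        (List.foldl pvStepA (d, m) rest).1 =
          pvGo rest (if pvContent rest = [] then d
                     else d.insert (pvKey m) (d.getD (pvKey m) [] ++ pvContent rest))) := by
  induction n with
  | zero =>
    intro rest hlen d
    have : rest = [] := List.eq_nil_of_length_eq_zero (Nat.le_zero.mp hlen)
    subst this
    exact ⟨rfl, fun m hm => by simp [pvGo, pvContent]⟩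
  | succ n ih =>
    intro rest hlen d
    cases rest with
    | nil => exact ⟨rfl, fun m hm => by simp [pvGo, pvContent]⟩
    | cons l r =>
      have hr : r.length ≤ n := by simpa using Nat.lt_succ_iff.mp (Nat.lt_of_lt_of_le (by simp) hlen)
      constructor
      · -- from the reset state ""
        by_cases hmk : PySem.Str.startswith l "@" = true
        · have hmk' : PySem.Chars.startswith l.toList ['@'] = true := by simpa using hmk
          have hstep : pvStepA (d, "") l = (d, l) := by simp [pvStepA, hmk']
          rw [List.foldl_cons, hstep]
          simp only [pvGo]
          rw [if_pos hmk]
          exact (ih r hr d).2 l hmk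
        · have hmk' : PySem.Chars.startswith l.toList ['@'] = false := by simpa using hmk
          have hstep : pvStepA (d, "") l = (d, "") := by
            by_cases he : l = "" <;> simp [pvStepA, hmk', he]
          rw [List.foldl_cons, hstep]
          simp only [pvGo]
          rw [if_neg hmk]
          exact (ih r hr d).1
      · -- from a marker state m
        intro m hm
        have hmne : m ≠ "" := by
          intro h; rw [h, pv_empty_not_marker] at hm; exact Bool.false_ne_true hm
        by_cases hmk : PySem.Str.startswith l "@" = true
        · -- the next marker: the block of (l :: r) is empty
          have hmk' : PySem.Chars.startswith l.toList ['@'] = true := by simpa using hmk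
          have hstep : pvStepA (d, m) l = (d, l) := by simp [pvStepA, hmk']
          have hc0 : pvContent (l :: r) = [] := by simp [pvContent, hmk']
          rw [List.foldl_cons, hstep, if_pos hc0]
          simp only [pvGo]
          rw [if_pos hmk]
          exact (ih r hr d).2 l hmk
        · by_cases he : l = ""
          · -- blank line: reset; the block is empty
            subst he
            have hstep : pvStepA (d, m) "" = (d, "") := by
              simp [pvStepA]
            have hc0 : pvContent ("" :: r) = [] := by simp [pvContent]
            rw [List.foldl_cons, hstep, if_pos hc0]
            simp only [pvGo]
            rw [if_neg (by rw [pv_empty_not_marker]; exact Bool.false_ne_true)]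
            exact (ih r hr d).1
          · -- a content line l of the current block
            have hmk' : PySem.Chars.startswith l.toList ['@'] = false := by simpa using hmk
            have hc : pvContent (l :: r) = l :: pvContent r := by
              simp [pvContent, he, hmk']
            have hstep : pvStepA (d, m) l =
                (d.insert (pvKey m) (d.getD (pvKey m) [] ++ [l]), m) := by
              simp [pvStepA, hmk', he, hmne]
            rw [List.foldl_cons, hstep, (ih r hr _).2 m hm, hc,
              if_neg (List.cons_ne_nil _ _)]
            simp only [pvGo]
            rw [if_neg hmk]
            by_cases hcr : pvContent r = []
            · rw [if_pos hcr, hcr]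
            · rw [if_neg hcr, PySem.Dict.getD_insert_self, PySem.Dict.insert_insert_self,
                List.append_assoc]
              rfl

-- B's fold over the enumeration of a suffix of lines = pre ++ suf equals pvGo on the suffix
theorem pvB_char (lines : List String) :
    ∀ (suf pre : List String) (s : Int), lines = pre ++ suf → s = (pre.length : Int) →
    ∀ (d : PySem.Dict String (List String)),
      (PySem.List.enumerate suf s).foldl
        (fun (sections : PySem.Dict String (List String)) p =>
          if PySem.Str.startswith p.2 "@" then
            let c := pvContent (PySem.List.slice lines (some (p.1 + 1)) none)
            if c ≠ [] then
              sections.insert (pvKey p.2) (sections.getD (pvKey p.2) [] ++ c)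
            else sections
          else sections) d = pvGo suf d := by
  intro suf
  induction suf with
  | nil => intro pre s h hs d; simp [pvGo, PySem.List.enumerate]
  | cons l r ih =>
    intro pre s h hs d
    subst hs
    have hdrop : PySem.List.slice lines (some ((pre.length : Int) + 1)) none = r := by
      rw [PySem.List.slice_from lines (show (0:Int) ≤ (pre.length : Int) + 1 by omega)]
      rw [show ((pre.length : Int) + 1).toNat = pre.length + 1 by omega, h]
      rw [show pre ++ l :: r = (pre ++ [l]) ++ r by simp,
        show pre.length + 1 = (pre ++ [l]).length by simp]
      exact List.drop_left
    have ihr := ih (pre ++ [l]) ((pre.length : Int) + 1) (by simp [h]) (by simp) 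
    rw [PySem.List.enumerate_cons, List.foldl_cons]
    dsimp only
    rw [hdrop]
    simp only [pvGo]
    by_cases hmk : PySem.Str.startswith l "@" = true
    · rw [if_pos hmk, if_pos hmk]
      by_cases hc : pvContent r = []
      · rw [if_neg (by simpa using hc), if_pos hc]
        exact ihr d
      · rw [if_pos (by simpa using hc), if_neg hc]
        exact ihr _
    · rw [if_neg hmk, if_neg hmk]
      exact ihr d

-- ===== VERDICT (by name: the statement is the Claim_ definition above) =====
theorem get_section_data_py_spec : Claim_equal_get_section_data_py := by
  intro lines _ _
  unfold Spec_get_section_data_py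
  rw [pvStepA_def]
  unfold get_section_data_py_alt
  rw [(pvA_char lines.length lines le_rfl PySem.Dict.empty).1,
    ← pvB_char lines lines [] 0 (by simp) (by simp) PySem.Dict.empty]
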